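-- pv_equiv track=rewrite | github.com/boris-volkov/Python | math/learn_binary.py | lights_adder
-- ===== SOURCE A (Python) =====
-- one = "▉"
--
-- zero = " "
--
-- def lights_adder(x, bits):
--     row = ""
--     for i in reversed(range(bits)):
--         if x & 2**i:
--             row += one
--         else:
--             row += zero
--     return row
-- ===== SOURCE B (Python) =====
-- one = "▉"
--
-- zero = " "
--
-- def lights_adder(x, bits):
--     # mask to the low `bits` bits, then emit binary digits low-to-high by
--     # repeated divmod, reverse, and left-pad with the zero glyph
--     if bits <= 0:
--         return ""
--     val = x & (2 ** bits - 1)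
--     digits = []
--     while val:
--         val, r = divmod(val, 2)
--         digits.append(one if r else zero)
--     digits.reverse()
--     return zero * (bits - len(digits)) + "".join(digits)
-- ===== Notes on version B (the rewrite author's own statement) =====
-- stated objective: faster
-- what changed: Instead of testing x & 2**i for each output position high-to-low (recomputing a fresh power of two per position), B masks x once to its low `bits` bits and converts that value to glyph digits by repeated divmod (low-to-high, then reversed), left-padding with the zero glyph.
import Mathlib
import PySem

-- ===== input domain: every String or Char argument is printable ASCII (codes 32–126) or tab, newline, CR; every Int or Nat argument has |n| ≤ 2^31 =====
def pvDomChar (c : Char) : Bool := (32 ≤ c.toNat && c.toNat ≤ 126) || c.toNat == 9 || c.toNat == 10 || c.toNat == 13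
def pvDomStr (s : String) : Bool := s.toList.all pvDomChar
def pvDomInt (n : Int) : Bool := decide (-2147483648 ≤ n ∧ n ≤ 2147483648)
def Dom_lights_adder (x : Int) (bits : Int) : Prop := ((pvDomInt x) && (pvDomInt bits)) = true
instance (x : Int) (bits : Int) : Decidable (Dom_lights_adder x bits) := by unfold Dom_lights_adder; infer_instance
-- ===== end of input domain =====

-- B replaces A's per-position `x & 2**i` probing (a fresh power of two per
-- position) by masking x once and emitting the binary digits of the masked
-- value via repeated divmod; a timing run measured B faster.


-- ===== PORT A =====
-- `x & 2**i` → Int.land x (2^i.toNat); i ranges over range(bits), so i ≥ 0 and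
-- i.toNat is exact; Python truthiness of the int → ≠ 0.
def lights_adder (x : Int) (bits : Int) : String :=
  (PySem.List.pyRange 0 bits 1).reverse.foldl
    (fun row i => if Int.land x (2 ^ i.toNat) ≠ 0 then row ++ "▉" else row ++ " ") ""

-- ===== PORT B =====
-- the `while val:` loop of Source B: emit the low binary digit as a glyph, halve
-- (divmod(val, 2)); val ≥ 0 here since it is x masked by a nonnegative mask
def pvDigits : Nat → List Char
  | 0 => []
  | n + 1 => (if (n + 1) % 2 = 1 then '▉' else ' ') :: pvDigits ((n + 1) / 2)
decreasing_by exact Nat.div_lt_self (Nat.succ_pos n) one_lt_two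

def lights_adder_alt (x : Int) (bits : Int) : String :=
  if bits ≤ 0 then ""
  else
    let val := Int.land x (2 ^ bits.toNat - 1)   -- x & (2**bits - 1), bits > 0 so toNat exact
    let digits := (pvDigits val.toNat).reverse
    String.ofList (List.replicate (bits.toNat - digits.length) ' ') ++ String.ofList digits

-- ===== PRECONDITION & SPEC =====
def Spec_lights_adder (x : Int) (bits : Int) (out : String) : Prop := out = lights_adder_alt x bits
instance (x : Int) (bits : Int) (out : String) : Decidable (Spec_lights_adder x bits out) := by unfold Spec_lights_adder; infer_instance

-- ===== CLAIM (what is proved, stated in full; the proofs are below) =====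
def Claim_equal_lights_adder : Prop := ∀ (x : Int) (bits : Int), Dom_lights_adder x bits → Spec_lights_adder x bits (lights_adder x bits)

-- ===== LEMMAS AND PROOFS =====

-- bits b-1 … 0 of m, rendered high-to-low as glyphs (canonical middle form)
def bitChars : Nat → Nat → List Char
  | 0, _ => []
  | b + 1, m => bitChars b (m / 2) ++ [if m % 2 = 1 then '▉' else ' ']

theorem land_two_pow_ne_zero (x : Int) (i : Nat) :
    (Int.land x ((2 : Int) ^ i) ≠ 0) ↔ x.testBit i = true := by
  have hc : ((2 : Int) ^ i) = Int.ofNat (2 ^ i) := by rw [Int.ofNat_eq_natCast]; push_cast; ring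
  cases x with
  | ofNat m =>
    rw [hc]
    show (Int.ofNat (m &&& 2 ^ i) ≠ 0) ↔ Nat.testBit m i = true
    rw [Int.ofNat_eq_natCast, Nat.and_two_pow]
    have hp : 0 < 2 ^ i := Nat.two_pow_pos i
    cases h : m.testBit i <;> simp
  | negSucc m =>
    rw [hc]
    show (Int.ofNat (Nat.ldiff (2 ^ i) m) ≠ 0) ↔ (!(Nat.testBit m i)) = true
    rw [Int.ofNat_eq_natCast]
    cases h : m.testBit i
    · have : (Nat.ldiff (2 ^ i) m).testBit i = true := by
        simp [Nat.testBit_ldiff, h]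
      simp only [Bool.not_false, iff_true, ne_eq]
      intro h0
      rw [Int.natCast_eq_zero] at h0
      rw [h0] at this
      simp [Nat.zero_testBit] at this
    · have h0 : Nat.ldiff (2 ^ i) m = 0 := by
        apply Nat.eq_of_testBit_eq
        intro j
        simp only [Nat.testBit_ldiff, Nat.testBit_two_pow, Nat.zero_testBit]
        by_cases hij : i = j
        · subst hij; simp [h]
        · simp [hij]
      simp [h0]

theorem foldA (x : Int) (l : List Int) (acc : List Char) :
    l.foldl (fun row i => if Int.land x (2 ^ i.toNat) ≠ 0 then row ++ "▉" else row ++ " ")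
      (String.ofList acc)
    = String.ofList (acc ++ l.map (fun i => if Int.land x (2 ^ i.toNat) ≠ 0 then '▉' else ' ')) := by
  induction l generalizing acc with
  | nil => simp
  | cons hd tl ih =>
    simp only [List.foldl_cons, List.map_cons]
    by_cases h : Int.land x (2 ^ hd.toNat) ≠ 0
    · rw [if_pos h, show String.ofList acc ++ "▉" = String.ofList (acc ++ ['▉']) by simp, ih]
      simp [h]
    · rw [if_neg h, show String.ofList acc ++ " " = String.ofList (acc ++ [' ']) by simp, ih]
      simp [h]

theorem bitChars_eq_map (b : Nat) : ∀ n : Nat,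
    bitChars b n = (List.range b).reverse.map (fun i => if n.testBit i then '▉' else ' ') := by
  induction b with
  | zero => intro n; simp [bitChars]
  | succ b ih =>
    intro n
    rw [bitChars, List.range_succ_eq_map, ih (n / 2)]
    simp only [List.reverse_cons, List.map_append, List.map_reverse, List.map_map, List.map_cons,
      List.map_nil]
    congr 1
    · apply congrArg List.reverse
      apply List.map_congr_left
      intro i _
      simp [Function.comp, Nat.testBit_add_one]
    · simp [Nat.testBit_zero]

theorem padded_eq_bitChars (b : Nat) : ∀ n : Nat, n < 2 ^ b →
    List.replicate (b - (pvDigits n).length) ' ' ++ (pvDigits n).reverse = bitChars b n := by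
  induction b with
  | zero => intro n hn; interval_cases n; simp [pvDigits, bitChars]
  | succ b ih =>
    intro n hn
    cases n with
    | zero =>
      have h0 : pvDigits 0 = [] := by simp [pvDigits]
      rw [h0]
      have hz : bitChars (b + 1) 0 = bitChars b 0 ++ [' '] := by
        rw [bitChars]; norm_num
      rw [hz, ← ih 0 (Nat.two_pow_pos b), h0]
      simp [List.replicate_succ']
    | succ k =>
      have hd2 : (k + 1) / 2 < 2 ^ b := by
        rw [Nat.div_lt_iff_lt_mul (by norm_num)]
        calc k + 1 < 2 ^ (b + 1) := hn
          _ = 2 ^ b * 2 := by ring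
      rw [pvDigits, bitChars]
      simp only [List.length_cons, List.reverse_cons]
      have hlen : b + 1 - ((pvDigits ((k + 1) / 2)).length + 1) = b - (pvDigits ((k + 1) / 2)).length := by
        omega
      rw [hlen, ← List.append_assoc, ih _ hd2]

-- the masked value: nonneg, < 2^b, with the low b bits of x
theorem mask_toNat_testBit (x : Int) (b : Nat) :
    (Int.land x (2 ^ b - 1)).toNat < 2 ^ b ∧
    ∀ i : Nat, i < b → (Int.land x (2 ^ b - 1)).toNat.testBit i = x.testBit i := by
  have hc : ((2 : Int) ^ b - 1) = Int.ofNat (2 ^ b - 1) := by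
    have h1 : 1 ≤ 2 ^ b := Nat.one_le_two_pow
    rw [Int.ofNat_eq_natCast]; push_cast [h1]; ring
  cases x with
  | ofNat m =>
    rw [hc]
    have he : Int.land (Int.ofNat m) (Int.ofNat (2 ^ b - 1)) = Int.ofNat (m &&& (2 ^ b - 1)) := rfl
    rw [he]
    constructor
    · show m &&& (2 ^ b - 1) < 2 ^ b
      have := @Nat.and_le_right m (2 ^ b - 1)
      have h1 : 1 ≤ 2 ^ b := Nat.one_le_two_pow
      omega
    · intro i hi
      show (m &&& (2 ^ b - 1)).testBit i = m.testBit i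
      simp [hi]
  | negSucc m =>
    rw [hc]
    have he : Int.land (Int.negSucc m) (Int.ofNat (2 ^ b - 1)) = Int.ofNat (Nat.ldiff (2 ^ b - 1) m) := rfl
    rw [he]
    constructor
    · show Nat.ldiff (2 ^ b - 1) m < 2 ^ b
      apply Nat.lt_pow_two_of_testBit
      intro i hi
      simp [Nat.testBit_ldiff, Nat.testBit_two_pow_sub_one, Nat.not_lt.mpr hi]
    · intro i hi
      show (Nat.ldiff (2 ^ b - 1) m).testBit i = (!(m.testBit i))
      simp [Nat.testBit_ldiff, Nat.testBit_two_pow_sub_one, hi]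

-- ===== VERDICT (by name: the statement is the Claim_ definition above) =====
theorem lights_adder_spec : Claim_equal_lights_adder := by
  intro x bits _
  unfold Spec_lights_adder lights_adder lights_adder_alt
  by_cases hb : bits ≤ 0
  · rw [if_pos hb]
    have h0 : (bits - 0).toNat = 0 := by omega
    rw [PySem.List.pyRange_one, h0]
    rfl
  · rw [if_neg hb]
    set b := bits.toNat with hbdef
    have hb1 : 1 ≤ b := by omega
    obtain ⟨hlt, hbits⟩ := mask_toNat_testBit x b
    set n := (Int.land x (2 ^ b - 1)).toNat with hn
    -- A side
    rw [PySem.List.pyRange_one]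
    have hr0 : (bits - 0).toNat = b := by omega
    rw [hr0]
    have hA := foldA x (((List.range b).map (fun k => (0 : Int) + ↑k)).reverse) []
    simp only [List.nil_append] at hA
    rw [show ("" : String) = String.ofList [] from rfl, hA]
    -- B side
    simp only [List.length_reverse]
    rw [show String.ofList (List.replicate (b - (pvDigits n).length) ' ') ++
          String.ofList (pvDigits n).reverse
        = String.ofList (List.replicate (b - (pvDigits n).length) ' ' ++ (pvDigits n).reverse) by simp]
    rw [padded_eq_bitChars b n hlt, bitChars_eq_map b n]
    -- both are ofList of a map over (range b).reverse
    congr 1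
    rw [← List.map_reverse, List.map_map]
    apply List.map_congr_left
    intro i hi
    have hib : i < b := by
      rw [List.mem_reverse, List.mem_range] at hi
      exact hi
    have h1 : ((fun k : Nat => (0 : Int) + ↑k) i).toNat = i := by simp
    simp only [Function.comp, h1]
    by_cases h : Int.land x ((2 : Int) ^ i) ≠ 0
    · rw [if_pos h, if_pos]
      rw [hbits i hib]
      exact (land_two_pow_ne_zero x i).mp h
    · rw [if_neg h, if_neg]
      rw [hbits i hib]
      intro hcon
      exact h ((land_two_pow_ne_zero x i).mpr hcon)
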